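-- pv_equiv track=rewrite | github.com/PGatak/basics | machine_learning/funkcja_aktywacji_neuronu.py | progowa_bipolarna
-- ===== SOURCE A (Python) =====
-- def progowa_bipolarna(lst):
--     lst.sort()
--     results = []
--     for i in lst:
--         if i > 0:
--             result = 1
--         else:
--             result = -1
--         results.append(result)
--     return results
-- ===== SOURCE B (Python) =====
-- def progowa_bipolarna(lst):
--     # Counting instead of sorting: count non-positives, emit that many -1s then 1s.
--     # Note: unlike A, B does not mutate lst (A sorts it in place); return value equal.
--     neg = sum(1 for i in lst if i <= 0)
--     return [-1] * neg + [1] * (len(lst) - neg)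
-- ===== Notes on version B (the rewrite author's own statement) =====
-- stated objective: simpler
-- what changed: B replaces sort-then-map-sign with a single pass counting the non-positive elements and emitting that many -1s followed by 1s (and does not mutate the input).
import Mathlib
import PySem

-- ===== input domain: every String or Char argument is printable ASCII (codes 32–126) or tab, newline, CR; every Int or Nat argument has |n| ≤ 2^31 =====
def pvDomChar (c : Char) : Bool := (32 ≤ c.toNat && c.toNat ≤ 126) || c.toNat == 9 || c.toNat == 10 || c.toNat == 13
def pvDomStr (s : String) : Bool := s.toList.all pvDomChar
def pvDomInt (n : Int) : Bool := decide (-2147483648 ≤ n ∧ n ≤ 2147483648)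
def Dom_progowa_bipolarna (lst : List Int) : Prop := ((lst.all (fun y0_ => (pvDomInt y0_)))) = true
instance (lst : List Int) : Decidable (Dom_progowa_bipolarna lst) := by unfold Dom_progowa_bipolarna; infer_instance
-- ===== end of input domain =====

-- B counts the non-positive elements in one pass instead of sorting then mapping signs; A sorts lst in place, B does not mutate — the equivalence is about the return value only.
-- ===== PORT A =====
def progowa_bipolarna (lst : List Int) : List Int :=
  let lst := PySem.List.sorted lst (fun x => x) false
  let results : List Int := []
  lst.foldl (fun results i =>
    results ++ [if i > 0 then (1 : Int) else (-1 : Int)]) results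

-- ===== PORT B =====
def progowa_bipolarna_alt (lst : List Int) : List Int :=
  let neg := (lst.filter (fun i => i ≤ 0)).length
  List.replicate neg (-1) ++ List.replicate (lst.length - neg) 1

-- ===== PRECONDITION & SPEC =====
def Spec_progowa_bipolarna (lst : List Int) (out : List Int) : Prop := out = progowa_bipolarna_alt lst
instance (lst : List Int) (out : List Int) : Decidable (Spec_progowa_bipolarna lst out) := by unfold Spec_progowa_bipolarna; infer_instance

-- ===== CLAIM (what is proved, stated in full; the proofs are below) =====
def Claim_equal_progowa_bipolarna : Prop := ∀ (lst : List Int), Dom_progowa_bipolarna lst → Spec_progowa_bipolarna lst (progowa_bipolarna lst)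

-- ===== LEMMAS AND PROOFS =====

-- ===== VERDICT (by name: the statement is the Claim_ definition above) =====
-- the fold in A's port is just a map
theorem pv_fold_eq_map (l : List Int) :
    l.foldl (fun results i => results ++ [if i > 0 then (1 : Int) else (-1 : Int)]) []
      = l.map (fun i => if i > 0 then (1 : Int) else (-1 : Int)) := by
  rw [PySem.List.foldl_append_eq_flatMap]
  induction l with
  | nil => rfl
  | cons a t ih => simp [ih]

-- map-sign of a ≤-sorted list is a block of -1s then a block of 1s
theorem pv_map_sign_of_pairwise (l : List Int) (h : l.Pairwise (· ≤ ·)) :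
    l.map (fun i => if i > 0 then (1 : Int) else (-1 : Int))
      = List.replicate (l.filter (fun i => i ≤ 0)).length (-1)
        ++ List.replicate (l.length - (l.filter (fun i => i ≤ 0)).length) 1 := by
  induction l with
  | nil => simp
  | cons a t ih =>
    rcases List.pairwise_cons.mp h with ⟨ha, ht⟩
    by_cases hpos : a > 0
    · have hall : t.filter (fun i => decide (i ≤ 0)) = [] := by
        apply List.filter_eq_nil_iff.mpr
        intro b hb
        have := ha b hb
        simp only [decide_eq_true_eq]
        omega
      have hmap : t.map (fun i => if i > 0 then (1 : Int) else (-1 : Int))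
          = List.replicate t.length 1 := by
        rw [ih ht, hall]; simp
      simp only [List.map_cons, if_pos hpos, List.filter_cons]
      have : ¬ (decide (a ≤ 0) = true) := by simp; omega
      simp only [this, hall, hmap]
      simp [List.replicate_succ]
    · have hle : decide (a ≤ 0) = true := by simp; omega
      simp only [List.map_cons, if_neg hpos, List.filter_cons, hle, if_pos,
        List.length_cons, ih ht, List.replicate_succ]
      have hlen : (t.filter (fun i => decide (i ≤ 0))).length ≤ t.length :=
        List.length_filter_le _ t
      have : t.length + 1 - ((t.filter (fun i => decide (i ≤ 0))).length + 1)
          = t.length - (t.filter (fun i => decide (i ≤ 0))).length := by omega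
      rw [this]; rfl

theorem progowa_bipolarna_spec : Claim_equal_progowa_bipolarna := by
  intro lst _
  unfold Spec_progowa_bipolarna progowa_bipolarna progowa_bipolarna_alt
  simp only []
  have hp := PySem.List.sorted_pairwise (xs := lst) (key := fun x => x)
  have hperm := PySem.List.sorted_perm (xs := lst) (key := fun x => x) (rev := false)
  rw [pv_fold_eq_map, pv_map_sign_of_pairwise _ hp, hperm.length_eq,
    (hperm.filter (fun i => decide (i ≤ 0))).length_eq]
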